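-- pv_equiv track=rewrite | github.com/namloga/DSA_labs | Lab1/task2/main.py | insertionSort_invate
-- ===== SOURCE A (Python) =====
-- def insertionSort_invate(a, n) :
--     l = []
--     index = 1
--     l.append(index)
--     for i in range(1 , n):
--         x = a[i]
--         pos = i - 1;
--         while pos >= 0 and a[pos] > x :
--             a[pos + 1] = a[pos]
--             pos -= 1
--         a[pos + 1] = x
--         index = pos + 2
--         l.append(index)
--     return a, l
-- ===== SOURCE B (Python) =====
-- # B: positions computed by a closed-form rank (count of earlier elements <= a[i])
-- # over the ORIGINAL prefix, and the prefix sorted with the library sort, instead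
-- # of simulating the shifting insertion loop.  Like A it mutates a in place.
-- def insertionSort_invate(a, n):
--     l = [1]
--     if n > 1:
--         for i in range(1, n):
--             l.append(1 + sum(1 for j in range(i) if a[j] <= a[i]))
--         a[:n] = sorted(a[:n])
--     return a, l
-- ===== Notes on version B (the rewrite author's own statement) =====
-- stated objective: simpler
-- what changed: Replaces the in-place shifting insertion-sort simulation by a closed-form rank (1 + count of earlier prefix elements <= a[i]) computed over the original prefix, plus one library sort of the prefix.
import Mathlib
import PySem

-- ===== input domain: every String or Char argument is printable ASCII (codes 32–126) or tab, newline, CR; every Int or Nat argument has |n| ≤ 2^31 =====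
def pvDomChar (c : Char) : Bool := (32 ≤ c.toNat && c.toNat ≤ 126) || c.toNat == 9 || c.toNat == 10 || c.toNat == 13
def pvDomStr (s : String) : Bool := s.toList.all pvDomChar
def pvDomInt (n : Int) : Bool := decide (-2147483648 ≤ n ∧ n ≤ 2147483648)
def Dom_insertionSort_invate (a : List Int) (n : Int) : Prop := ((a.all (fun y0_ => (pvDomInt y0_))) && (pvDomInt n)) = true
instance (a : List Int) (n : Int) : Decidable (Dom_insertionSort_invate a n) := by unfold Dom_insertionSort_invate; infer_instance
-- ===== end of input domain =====

-- B replaces A's shifting insertion-sort simulation by a closed-form rank count plus one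
-- library sort (objective: simpler); both Pythons mutate `a` in place the same way, the
-- theorems are about the returned pair.

-- ===== PORT A =====
-- the inner `while pos >= 0 and a[pos] > x:` loop of A; structural recursion on
-- `fuel`, which pvWhileA passes as pos + 1 — the loop decrements pos each round,
-- so it runs at most pos + 1 times and the fuel is never exhausted (exact port)
def pvWhileAux (fuel : Nat) (a : List Int) (x : Int) (pos : Int) : List Int × Int :=
  match fuel with
  | 0 => (a, pos)
  | fuel + 1 =>
    if pos ≥ 0 ∧ PySem.List.pyGetD a pos 0 > x then
      pvWhileAux fuel (PySem.List.pySetD a (pos + 1) (PySem.List.pyGetD a pos 0)) x (pos - 1)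
    else
      (a, pos)

def pvWhileA (a : List Int) (x : Int) (pos : Int) : List Int × Int :=
  pvWhileAux (pos + 1).toNat a x pos

def insertionSort_invate (a : List Int) (n : Int) : List Int × List Int :=
  (PySem.List.pyRange 1 n 1).foldl
    (fun st i =>
      let x := PySem.List.pyGetD st.1 i 0            -- x = a[i]  (in range under Pre_)
      let p := pvWhileA st.1 x (i - 1)               -- the while loop
      (PySem.List.pySetD p.1 (p.2 + 1) x,            -- a[pos + 1] = x
       st.2 ++ [p.2 + 2]))                           -- l.append(pos + 2)
    (a, [(1 : Int)])

-- ===== PORT B =====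
def insertionSort_invate_alt (a : List Int) (n : Int) : List Int × List Int :=
  if n > 1 then
    let l := (PySem.List.pyRange 1 n 1).foldl
      (fun l i => l ++ [1 + (PySem.List.pyRange 0 i 1).foldl
          (fun s j => if PySem.List.pyGetD a j 0 ≤ PySem.List.pyGetD a i 0 then s + 1 else s)
          0])
      [(1 : Int)]
    (PySem.List.sorted (PySem.List.slice a none (some n)) (fun x => x) false
       ++ PySem.List.slice a (some n) none,          -- a[:n] = sorted(a[:n])
     l)
  else
    (a, [(1 : Int)])


-- ===== PRECONDITION & SPEC =====
-- A raises IndexError (a[i] with i ≥ len(a)) exactly when n > len(a) and n > 1 (the loop runs); those inputs are excluded.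
def Pre_insertionSort_invate (a : List Int) (n : Int) : Prop := n ≤ (a.length : Int) ∨ n ≤ 1
instance (a : List Int) (n : Int) : Decidable (Pre_insertionSort_invate a n) := by
  unfold Pre_insertionSort_invate; infer_instance

def pvWitness_insertionSort_invate : List Int × Int := ([3, 1, 2], 3)

def Spec_insertionSort_invate (a : List Int) (n : Int) (out : List Int × List Int) : Prop :=
  out = insertionSort_invate_alt a n
instance (a : List Int) (n : Int) (out : List Int × List Int) :
    Decidable (Spec_insertionSort_invate a n out) := by
  unfold Spec_insertionSort_invate; infer_instance

-- ===== CLAIM (what is proved, stated in full; the proofs are below) =====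
def Claim_equal_insertionSort_invate : Prop :=
  ∀ (a : List Int) (n : Int), Dom_insertionSort_invate a n →
    Pre_insertionSort_invate a n →
    Spec_insertionSort_invate a n (insertionSort_invate a n)

-- ===== LEMMAS AND PROOFS =====

-- pvIns x s: stable insertion of x after all elements ≤ x; pvFoldIns: insertion sort of a list
def pvIns (x : Int) (s : List Int) : List Int :=
  s.filter (fun y => decide (y ≤ x)) ++ x :: s.filter (fun y => !decide (y ≤ x))

def pvFoldIns (xs : List Int) : List Int := xs.foldl (fun s x => pvIns x s) []

theorem pvIns_length (x : Int) (s : List Int) : (pvIns x s).length = s.length + 1 := by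
  simp [pvIns]
  have := List.length_filter_le (fun y => decide (y ≤ x)) s
  have h2 : (s.filter (fun y => decide (y ≤ x))).length + (s.filter (fun y => !decide (y ≤ x))).length = s.length :=
    (List.filter_append_perm (fun y => decide (y ≤ x)) s).length_eq ▸ (List.length_append ..).symm ▸ rfl
  omega

theorem pvIns_perm (x : Int) (s : List Int) : (pvIns x s).Perm (x :: s) := by
  unfold pvIns
  exact List.perm_middle.trans ((List.filter_append_perm _ s).cons x)

theorem pvIns_pairwise (x : Int) (s : List Int) (h : s.Pairwise (· ≤ ·)) :
    (pvIns x s).Pairwise (· ≤ ·) := by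
  unfold pvIns
  rw [List.pairwise_append]
  refine ⟨h.sublist (List.filter_sublist), ?_, ?_⟩
  · rw [List.pairwise_cons]
    refine ⟨?_, h.sublist (List.filter_sublist)⟩
    intro y hy
    have := (List.mem_filter.mp hy).2
    simp at this; omega
  · intro y hy z hz
    have h1 := (List.mem_filter.mp hy).2
    rcases List.mem_cons.mp hz with rfl | hz'
    · simpa using h1
    · have h2 := (List.mem_filter.mp hz').2
      simp at h1 h2; omega
theorem pvFoldIns_snoc (xs : List Int) (y : Int) :
    pvFoldIns (xs ++ [y]) = pvIns y (pvFoldIns xs) := by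
  simp [pvFoldIns]

theorem pvFoldIns_length (xs : List Int) : (pvFoldIns xs).length = xs.length := by
  induction xs using List.reverseRecOn with
  | nil => rfl
  | append_singleton xs y ih => rw [pvFoldIns_snoc, pvIns_length, ih]; simp

theorem pvFoldIns_perm (xs : List Int) : (pvFoldIns xs).Perm xs := by
  induction xs using List.reverseRecOn with
  | nil => rfl
  | append_singleton xs y ih =>
    rw [pvFoldIns_snoc]
    exact ((pvIns_perm y _).trans ((ih.cons y).trans (by simpa using (List.perm_middle (a := y) (l₁ := xs) (l₂ := [])).symm)))

theorem pvFoldIns_pairwise (xs : List Int) : (pvFoldIns xs).Pairwise (· ≤ ·) := by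
  induction xs using List.reverseRecOn with
  | nil => exact List.Pairwise.nil
  | append_singleton xs y ih => rw [pvFoldIns_snoc]; exact pvIns_pairwise y _ ih

theorem pvWhileAux_spec (u : List Int) (x z : Int) (r : List Int) (hs : u.Pairwise (· ≤ ·)) :
    pvWhileAux u.length (u ++ z :: r) x ((u.length : Int) - 1) =
      (u.filter (fun y => decide (y ≤ x)) ++
         (match u.filter (fun y => !decide (y ≤ x)) with
          | [] => [z]
          | t0 :: t => t0 :: t0 :: t) ++ r,
       (u.countP (fun y => decide (y ≤ x)) : Int) - 1) := by
  induction u using List.reverseRecOn generalizing z r with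
  | nil => simp [pvWhileAux]
  | append_singleton u' y ih =>
    have hcross : ∀ e ∈ u', e ≤ y := by
      have := (List.pairwise_append.mp hs).2.2
      intro e he; exact this e he y (List.mem_singleton_self y)
    have hu' : u'.Pairwise (· ≤ ·) := (List.pairwise_append.mp hs).1
    have hlen : (u' ++ [y]).length = u'.length + 1 := by simp
    rw [hlen]
    have hget : PySem.List.pyGetD ((u' ++ [y]) ++ z :: r) (((u'.length + 1 : Nat) : Int) - 1) 0 = y := by
      have : (((u'.length + 1 : Nat) : Int) - 1) = ((u'.length : Nat) : Int) := by push_cast; ring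
      rw [this, PySem.List.pyGetD_natCast]
      rw [List.append_assoc]
      simp [List.getD_eq_getElem?_getD]
    by_cases hyx : x < y
    · rw [pvWhileAux]
      rw [if_pos ⟨by push_cast; omega, by rw [hget]; exact hyx⟩]
      rw [hget]
      have hset : PySem.List.pySetD ((u' ++ [y]) ++ z :: r) ((((u'.length + 1 : Nat) : Int) - 1) + 1) y
          = u' ++ [y] ++ (y :: r) := by
        have : ((((u'.length + 1 : Nat) : Int) - 1) + 1) = (((u'.length + 1 : Nat)) : Int) := by push_cast; ring
        rw [this, PySem.List.pySetD_natCast]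
        rw [List.append_assoc]
        rw [List.set_append_right _ _ (by simp)]
        simp
      rw [hset]
      have harith : (((u'.length + 1 : Nat) : Int) - 1) - 1 = (u'.length : Int) - 1 := by push_cast; ring
      rw [harith, List.append_assoc]
      simp only [List.singleton_append]
      rw [ih (y) (y :: r) hu']
      have hfle : (u' ++ [y]).filter (fun e => decide (e ≤ x)) = u'.filter (fun e => decide (e ≤ x)) := by
        simp [List.filter_append, show ¬ (y ≤ x) by omega]
      have hfgt : (u' ++ [y]).filter (fun e => !decide (e ≤ x)) = u'.filter (fun e => !decide (e ≤ x)) ++ [y] := by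
        simp [List.filter_append, show ¬ (y ≤ x) by omega]
      have hcnt : (u' ++ [y]).countP (fun e => decide (e ≤ x)) = u'.countP (fun e => decide (e ≤ x)) := by
        simp [List.countP_append, show ¬ (y ≤ x) by omega]
      rw [hfle, hfgt, hcnt]
      rcases hft : u'.filter (fun e => !decide (e ≤ x)) with _ | ⟨t0, t⟩ <;> simp
    · rw [pvWhileAux]
      rw [if_neg (by rw [hget]; omega)]
      have hall : ∀ e ∈ u' ++ [y], e ≤ x := by
        intro e he
        rcases List.mem_append.mp he with h1 | h1
        · exact le_trans (hcross e h1) (by omega)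
        · rcases List.mem_singleton.mp h1 with rfl; omega
      have hfle : (u' ++ [y]).filter (fun e => decide (e ≤ x)) = u' ++ [y] :=
        List.filter_eq_self.mpr (fun e he => by simpa using hall e he)
      have hfgt : (u' ++ [y]).filter (fun e => !decide (e ≤ x)) = [] :=
        List.filter_eq_nil_iff.mpr (fun e he => by simpa using hall e he)
      have hcnt : (u' ++ [y]).countP (fun e => decide (e ≤ x)) = u'.length + 1 := by
        rw [List.countP_eq_length.mpr (fun e he => by simpa using hall e he)]; simp
      rw [hfle, hfgt, hcnt]
      simp
theorem pvStepA_spec (u : List Int) (x : Int) (r : List Int) (hs : u.Pairwise (· ≤ ·)) :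
    (let p := pvWhileA (u ++ x :: r) x ((u.length : Int) - 1)
     (PySem.List.pySetD p.1 (p.2 + 1) x, p.2 + 2)) =
      (pvIns x u ++ r, (u.countP (fun y => decide (y ≤ x)) : Int) + 1) := by
  have hfuel : (((u.length : Int) - 1) + 1).toNat = u.length := by omega
  have hw : pvWhileA (u ++ x :: r) x ((u.length : Int) - 1)
      = pvWhileAux u.length (u ++ x :: r) x ((u.length : Int) - 1) := by
    rw [pvWhileA, hfuel]
  rw [hw, pvWhileAux_spec u x x r hs]
  have hcl : u.countP (fun y => decide (y ≤ x)) = (u.filter (fun y => decide (y ≤ x))).length :=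
    List.countP_eq_length_filter ..
  have hidx : ((u.countP (fun y => decide (y ≤ x)) : Int) - 1) + 1
      = ((u.filter (fun y => decide (y ≤ x))).length : Int) := by rw [hcl]; ring
  simp only
  rw [hidx, PySem.List.pySetD_natCast]
  rw [List.append_assoc, List.set_append_right _ _ (by simp)]
  unfold pvIns
  rcases hft : u.filter (fun y => !decide (y ≤ x)) with _ | ⟨t0, t⟩
  · simp; ring
  · simp; ring
theorem pvLoopA (a : List Int) (k : Nat) (hk : (k : Int) + 1 ≤ (a.length : Int)) :
    (PySem.List.pyRange 1 ((k : Int) + 1) 1).foldl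
      (fun st i =>
        let x := PySem.List.pyGetD st.1 i 0
        let p := pvWhileA st.1 x (i - 1)
        (PySem.List.pySetD p.1 (p.2 + 1) x, st.2 ++ [p.2 + 2]))
      (a, [(1 : Int)]) =
    (pvFoldIns (a.take (k + 1)) ++ a.drop (k + 1),
     [(1 : Int)] ++ (PySem.List.pyRange 1 ((k : Int) + 1) 1).map
       (fun i => ((a.take i.toNat).countP (fun y => decide (y ≤ PySem.List.pyGetD a i 0)) : Int) + 1)) := by
  induction k with
  | zero =>
    rcases a with _ | ⟨a0, as⟩
    · simp at hk
    · simp [PySem.List.pyRange_one_eq_nil, pvFoldIns, pvIns]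
  | succ k ih =>
    have hk' : (k : Int) + 1 ≤ (a.length : Int) := by push_cast at hk ⊢; omega
    have hlt : k + 1 < a.length := by omega
    have hrange : PySem.List.pyRange 1 (((k + 1 : Nat) : Int) + 1) 1
        = PySem.List.pyRange 1 ((k : Int) + 1) 1 ++ [(k : Int) + 1] := by
      have h1 : (((k + 1 : Nat) : Int) + 1) = ((k : Int) + 1) + 1 := by push_cast; ring
      rw [h1, PySem.List.pyRange_one_succ_right (by omega)]
    rw [hrange, List.foldl_append, List.map_append, ih hk']
    simp only [List.foldl_cons, List.foldl_nil, List.map_cons, List.map_nil]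
    have hPlen : (pvFoldIns (a.take (k + 1))).length = k + 1 := by
      rw [pvFoldIns_length, List.length_take]; omega
    have hdrop : a.drop (k + 1) = a[k + 1] :: a.drop (k + 2) :=
      List.drop_eq_getElem_cons hlt
    have hPsort := pvFoldIns_pairwise (a.take (k + 1))
    have hx : PySem.List.pyGetD (pvFoldIns (a.take (k + 1)) ++ a[k + 1] :: a.drop (k + 2)) ((k : Int) + 1) 0
        = a[k + 1] := by
      have h1 : ((k : Int) + 1) = ((k + 1 : Nat) : Int) := by push_cast; ring
      rw [h1, PySem.List.pyGetD_natCast, List.getD_eq_getElem?_getD,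
        List.getElem?_append_right (by omega), hPlen]
      simp [List.getElem?_eq_getElem hlt]
    have hpos : (k : Int) + 1 - 1 = ((pvFoldIns (a.take (k + 1))).length : Int) - 1 := by
      rw [hPlen]; push_cast; ring
    have hstep := pvStepA_spec (pvFoldIns (a.take (k + 1))) (a[k + 1]) (a.drop (k + 2)) hPsort
    simp only at hstep
    rw [Prod.mk.injEq] at hstep
    rw [hdrop, hx, hpos]
    rw [Prod.mk.injEq]
    constructor
    · rw [hstep.1]
      have htake : a.take (k + 1 + 1) = a.take (k + 1) ++ [a[k + 1]] := by
        rw [List.take_add_one, List.getElem?_eq_getElem hlt]; rfl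
      rw [htake, pvFoldIns_snoc]
    · rw [hstep.2]
      have hcp : (pvFoldIns (a.take (k + 1))).countP (fun y => decide (y ≤ a[k + 1]))
          = (a.take (k + 1)).countP (fun y => decide (y ≤ a[k + 1])) :=
        (pvFoldIns_perm _).countP_eq _
      have hgeta : PySem.List.pyGetD a ((k : Int) + 1) 0 = a[k + 1] := by
        have h1 : ((k : Int) + 1) = ((k + 1 : Nat) : Int) := by push_cast; ring
        rw [h1, PySem.List.pyGetD_natCast, List.getD_eq_getElem?_getD]
        simp [List.getElem?_eq_getElem hlt]
      have htn : ((k : Int) + 1).toNat = k + 1 := by omega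
      rw [List.append_assoc]
      simp [hcp, hgeta, htn]
theorem pvTakeMap (a : List Int) (i : Int) (h0 : 0 ≤ i) (hle : i ≤ (a.length : Int)) :
    (PySem.List.pyRange 0 i 1).map (fun j => PySem.List.pyGetD a j 0) = a.take i.toNat := by
  apply List.ext_getElem
  · simp [PySem.List.length_pyRange_one]; omega
  · intro k h1 h2
    have hki : k < i.toNat := by
      simp [PySem.List.length_pyRange_one] at h1; omega
    have hkl : k < a.length := by omega
    simp only [List.getElem_map, PySem.List.getElem_pyRange_one, List.getElem_take]
    have h3 : ((0 : Int) + k) = ((k : Nat) : Int) := by ring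
    rw [h3, PySem.List.pyGetD_natCast, List.getD_eq_getElem?_getD]
    simp [List.getElem?_eq_getElem hkl]

theorem pvMain (a : List Int) (n : Int) (hpre : Pre_insertionSort_invate a n) :
    insertionSort_invate a n = insertionSort_invate_alt a n := by
  unfold insertionSort_invate insertionSort_invate_alt Pre_insertionSort_invate at *
  by_cases hn : n > 1
  · have hpre' : n ≤ (a.length : Int) := by
      rcases hpre with h1 | h1
      · exact h1
      · omega
    rw [if_pos hn]
    have hk : n = ((n - 1).toNat : Int) + 1 := by omega
    have hkb : ((n - 1).toNat : Int) + 1 ≤ (a.length : Int) := by omega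
    have hloop := pvLoopA a (n - 1).toNat hkb
    have htn : (n - 1).toNat + 1 = n.toNat := by omega
    rw [← hk, htn] at hloop
    rw [hloop]
    rw [Prod.mk.injEq]
    constructor
    · have hsl1 : PySem.List.slice a none (some n) = a.take n.toNat :=
        PySem.List.slice_to a (by omega)
      have hsl2 : PySem.List.slice a (some n) none = a.drop n.toNat :=
        PySem.List.slice_from a (by omega)
      rw [hsl1, hsl2]
      have hsorted : PySem.List.sorted (a.take n.toNat) (fun x => x) false
          = pvFoldIns (a.take n.toNat) :=
        PySem.List.sorted_id_eq_of_perm_of_pairwise _ _ (pvFoldIns_perm _) (pvFoldIns_pairwise _)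
      rw [hsorted]
    · rw [PySem.List.foldl_append_singleton_eq_map]
      simp only [List.singleton_append, List.cons.injEq, true_and]
      apply List.map_congr_left
      intro i hi
      have hmem := (PySem.List.mem_pyRange_one.mp hi)
      have h0i : 0 ≤ i := by omega
      have hil : i ≤ (a.length : Int) := by omega
      rw [PySem.List.foldl_ite_add_one (fun j => PySem.List.pyGetD a j 0 ≤ PySem.List.pyGetD a i 0)]
      rw [← pvTakeMap a i h0i hil, List.countP_map]
      have : (fun j => decide (PySem.List.pyGetD a j 0 ≤ PySem.List.pyGetD a i 0))
          = ((fun y => decide (y ≤ PySem.List.pyGetD a i 0)) ∘ (fun j => PySem.List.pyGetD a j 0)) := rfl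
      rw [this]
      ring
  · rw [if_neg hn]
    rw [PySem.List.pyRange_one_eq_nil (by omega)]
    simp

-- ===== VERDICT (by name: the statement is the Claim_ definition above) =====
theorem insertionSort_invate_spec : Claim_equal_insertionSort_invate := by
  intro a n _ hpre
  unfold Spec_insertionSort_invate
  exact pvMain a n hpre
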